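-- pv_equiv track=rewrite | github.com/Antonholmbergg/advent_of_code | 2025/python/day02/main.py | _check_n_repeats
-- ===== SOURCE A (Python) =====
-- def _check_n_repeats(id: str, n_repeats):
--     n_digits = len(id)
--     if (n_digits % n_repeats) != 0:
--         return False
--     length_of_repeat = n_digits // n_repeats
--     sections = [id[length_of_repeat*i:length_of_repeat*(i+1)] for i in range(n_repeats)]
--     if all([sections[0] == section for section in sections[1:]]):
--         return True
--     else:
--         return False
-- ===== SOURCE B (Python) =====
-- def _check_n_repeats(id: str, n_repeats):
--     if len(id) % n_repeats != 0:
--         return False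
--     length_of_repeat = len(id) // n_repeats
--     return id == id[:length_of_repeat] * n_repeats
-- ===== Notes on version B (the rewrite author's own statement) =====
-- stated objective: simpler
-- what changed: Replaces the list of per-block slices and the all(...) pairwise comparison with a single closed-form test id == id[:length_of_repeat] * n_repeats.
-- intended difference: For negative n_repeats that divide len(id) with id nonempty, A returns True (range(n_repeats) is empty so all([]) holds vacuously) while B returns False, the intended answer since a nonempty string cannot be a negative number of repeated blocks. — e.g. on _check_n_repeats("ab", -1): A returns true, B returns false
import Mathlib
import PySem

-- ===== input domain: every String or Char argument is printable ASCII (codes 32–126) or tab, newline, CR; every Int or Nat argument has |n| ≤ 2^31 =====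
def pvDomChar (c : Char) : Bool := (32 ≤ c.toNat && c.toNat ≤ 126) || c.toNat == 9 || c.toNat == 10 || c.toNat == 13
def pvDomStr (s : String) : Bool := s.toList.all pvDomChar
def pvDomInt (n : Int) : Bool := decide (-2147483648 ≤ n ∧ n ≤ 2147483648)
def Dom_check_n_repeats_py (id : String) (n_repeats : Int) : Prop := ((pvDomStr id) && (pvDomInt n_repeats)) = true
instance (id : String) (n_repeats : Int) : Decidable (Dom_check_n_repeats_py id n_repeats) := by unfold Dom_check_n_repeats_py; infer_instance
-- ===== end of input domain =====

-- B replaces the per-block slice list + all(...) comparison by the closed-form test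
-- id == id[:L] * n_repeats (simpler); on negative n_repeats dividing len(id) with id
-- nonempty A returns True vacuously while B returns False (see D_ below).


-- ===== PORT A =====
def check_n_repeats_py (id : String) (n_repeats : Int) : Bool :=
  let n_digits : Int := PySem.Str.len id
  if PySem.Int.mod n_digits n_repeats != 0 then false
  else
    let length_of_repeat := PySem.Int.floordiv n_digits n_repeats
    let sections : List (List Char) := (PySem.List.pyRange 0 n_repeats 1).map
      (fun i => PySem.List.slice id.toList (some (length_of_repeat * i)) (some (length_of_repeat * (i + 1))))
    -- 'sections[0]' in the comprehension: only evaluated when sections[1:] is nonempty, so headD [] is exact there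
    let checks := (PySem.List.slice sections (some 1) none).map
      (fun sec => decide (sections.headD [] = sec))
    if checks.all (fun b => b) then true else false

-- ===== PORT B =====
def check_n_repeats_py_alt (id : String) (n_repeats : Int) : Bool :=
  if PySem.Int.mod (PySem.Str.len id) n_repeats != 0 then false
  else
    let length_of_repeat := PySem.Int.floordiv (PySem.Str.len id) n_repeats
    -- id[:L] * n_repeats: Python string repetition, negative count gives ''
    let block := PySem.List.slice id.toList none (some length_of_repeat)
    decide (id.toList = (List.replicate n_repeats.toNat block).flatten)

-- ===== PRECONDITION & SPEC =====
-- Pre_ excludes only n_repeats = 0, where Python's '%' raises ZeroDivisionError (in both A and B).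
def Pre_check_n_repeats_py (id : String) (n_repeats : Int) : Prop := n_repeats ≠ 0
instance (id : String) (n_repeats : Int) : Decidable (Pre_check_n_repeats_py id n_repeats) := by unfold Pre_check_n_repeats_py; infer_instance
def pvWitness_check_n_repeats_py : String × Int := ("abab", 2)

-- For negative n_repeats that divide len(id) with id nonempty, A returns True (range(n_repeats)
-- is empty so all([]) holds vacuously) while B returns False, the intended answer since a nonempty
-- string cannot be a negative number of repeated blocks.
def D_check_n_repeats_py (id : String) (n_repeats : Int) : Prop :=
  n_repeats < 0 ∧ id ≠ "" ∧ n_repeats ∣ (id.toList.length : Int)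
instance (id : String) (n_repeats : Int) : Decidable (D_check_n_repeats_py id n_repeats) := by unfold D_check_n_repeats_py; infer_instance

def Spec_check_n_repeats_py (id : String) (n_repeats : Int) (out : Bool) : Prop := ¬ D_check_n_repeats_py id n_repeats → out = check_n_repeats_py_alt id n_repeats
instance (id : String) (n_repeats : Int) (out : Bool) : Decidable (Spec_check_n_repeats_py id n_repeats out) := by unfold Spec_check_n_repeats_py; infer_instance

def pvDiffWitness_check_n_repeats_py : String × Int := ("ab", -1)
def pvDiffWitnessOut_check_n_repeats_py : Bool × Bool := (true, false)

-- ===== CLAIM (what is proved, stated in full; the proofs are below) =====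
def Claim_unchanged_check_n_repeats_py : Prop := ∀ (id : String) (n_repeats : Int), Dom_check_n_repeats_py id n_repeats → Pre_check_n_repeats_py id n_repeats → Spec_check_n_repeats_py id n_repeats (check_n_repeats_py id n_repeats)
def Claim_changed_check_n_repeats_py : Prop := Dom_check_n_repeats_py (pvDiffWitness_check_n_repeats_py.1) (pvDiffWitness_check_n_repeats_py.2) ∧ Pre_check_n_repeats_py (pvDiffWitness_check_n_repeats_py.1) (pvDiffWitness_check_n_repeats_py.2) ∧ D_check_n_repeats_py (pvDiffWitness_check_n_repeats_py.1) (pvDiffWitness_check_n_repeats_py.2) ∧ check_n_repeats_py (pvDiffWitness_check_n_repeats_py.1) (pvDiffWitness_check_n_repeats_py.2) = pvDiffWitnessOut_check_n_repeats_py.1 ∧ check_n_repeats_py_alt (pvDiffWitness_check_n_repeats_py.1) (pvDiffWitness_check_n_repeats_py.2) = pvDiffWitnessOut_check_n_repeats_py.2 ∧ pvDiffWitnessOut_check_n_repeats_py.1 ≠ pvDiffWitnessOut_check_n_repeats_py.2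
def Claim_exact_check_n_repeats_py : Prop := ∀ (id : String) (n_repeats : Int), Dom_check_n_repeats_py id n_repeats → Pre_check_n_repeats_py id n_repeats → D_check_n_repeats_py id n_repeats → check_n_repeats_py id n_repeats ≠ check_n_repeats_py_alt id n_repeats

-- ===== LEMMAS AND PROOFS =====

theorem flatten_replicate_chunk {α : Type} (B : List α) :
    ∀ (N k : Nat), k < N → (((List.replicate N B).flatten.drop (B.length * k)).take B.length = B) := by
  intro N k
  induction k generalizing N with
  | zero =>
    intro hN
    cases N with
    | zero => omega
    | succ N' => simp [List.replicate_succ]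
  | succ k ih =>
    intro hN
    cases N with
    | zero => omega
    | succ N' =>
      have h1 : B.length * (k + 1) = B.length + B.length * k := by ring
      rw [h1, List.replicate_succ, List.flatten_cons, ← List.drop_drop, List.drop_left]
      exact ih N' (by omega)

theorem chunks_iff {α : Type} (L : Nat) :
    ∀ (N : Nat) (cs : List α), cs.length = L * N →
    ((cs = (List.replicate N (cs.take L)).flatten) ↔ ∀ k < N, (cs.drop (L * k)).take L = cs.take L) := by
  intro N
  induction N with
  | zero =>
    intro cs h
    have : cs = [] := List.eq_nil_of_length_eq_zero (by omega)
    subst this; simp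
  | succ N' ih =>
    intro cs h
    have hLle : L ≤ cs.length := by rw [h, Nat.mul_succ]; exact Nat.le_add_left _ _
    constructor
    · intro heq k hk
      have hB : (cs.take L).length = L := by rw [List.length_take]; omega
      have h2 := flatten_replicate_chunk (cs.take L) (N' + 1) k hk
      rw [hB] at h2
      rw [← heq] at h2
      exact h2
    · intro hall
      have htl : (cs.drop L).length = L * N' := by
        rw [List.length_drop, h, Nat.mul_succ]; omega
      have hih : cs.drop L = (List.replicate N' (cs.take L)).flatten := by
        cases N' with
        | zero =>
          rw [Nat.mul_zero] at htl
          simp [List.eq_nil_of_length_eq_zero htl]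
        | succ N'' =>
          have htake : (cs.drop L).take L = cs.take L := by
            have := hall 1 (by omega)
            simpa using this
          have h2 : cs.drop L = (List.replicate (N'' + 1) ((cs.drop L).take L)).flatten :=
            (ih _ htl).mpr (fun k hk => by
              rw [htake, List.drop_drop]
              have harg : L + L * k = L * (k + 1) := by ring
              rw [harg]
              exact hall (k + 1) (by omega))
          rw [h2, htake]
      calc cs = cs.take L ++ cs.drop L := (List.take_append_drop L cs).symm
        _ = cs.take L ++ (List.replicate N' (cs.take L)).flatten := by rw [← hih]
        _ = (List.replicate (N' + 1) (cs.take L)).flatten := by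
              rw [List.replicate_succ, List.flatten_cons]

theorem a_neg_true (id : String) (n : Int) (hn : n < 0)
    (hmod : PySem.Int.mod (PySem.Str.len id) n = 0) :
    check_n_repeats_py id n = true := by
  simp only [check_n_repeats_py, hmod]
  rw [PySem.List.pyRange_one_eq_nil (by omega)]
  simp [PySem.List.slice_from_one]

theorem pos_case (id : String) (n : Int) (hpos : 0 < n)
    (hmod : PySem.Int.mod (PySem.Str.len id) n = 0)
    (Lnat : Nat)
    (hfd : PySem.Int.floordiv (PySem.Str.len id) n = (Lnat : Int))
    (hlenEq : id.toList.length = Lnat * n.toNat) :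
    check_n_repeats_py id n = check_n_repeats_py_alt id n := by
  simp only [check_n_repeats_py, check_n_repeats_py_alt, hmod, hfd]
  simp only [bne_self_eq_false, Bool.false_eq_true, if_false]
  rw [PySem.List.pyRange_one, PySem.List.slice_from_one]
  simp only [Int.sub_zero, List.map_map]
  obtain ⟨N', hN⟩ : ∃ N', n.toNat = N' + 1 := ⟨n.toNat - 1, by omega⟩
  rw [hN]
  set cs := id.toList with hcs
  have hchunk : (List.range (N' + 1)).map ((fun i => PySem.List.slice cs (some ((Lnat : Int) * i)) (some ((Lnat : Int) * (i + 1)))) ∘ (fun k : Nat => (0 : Int) + k)) = (List.range (N' + 1)).map (fun k : Nat => (cs.drop (Lnat * k)).take Lnat) := by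
    apply List.map_congr_left
    intro k _
    show PySem.List.slice cs (some ((Lnat : Int) * ((0 : Int) + k))) (some ((Lnat : Int) * (((0 : Int) + k) + 1))) = (cs.drop (Lnat * k)).take Lnat
    have e1 : ((Lnat : Int) * ((0 : Int) + k)) = ((Lnat * k : Nat) : Int) := by push_cast; ring
    have e2 : ((Lnat : Int) * (((0 : Int) + k) + 1)) = ((Lnat * k + Lnat : Nat) : Int) := by push_cast; ring
    rw [e1, e2, PySem.List.slice_natCast]
    congr 1
    omega
  rw [hchunk]
  rw [List.range_succ_eq_map, List.map_cons, List.tail_cons, List.headD_cons, List.map_map]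
  rw [PySem.List.slice_to_natCast]
  have collapse : ∀ b : Bool, (if b = true then true else false) = b := by decide
  rw [collapse]
  simp only [Nat.mul_zero, List.drop_zero]
  rw [List.map_map, Bool.eq_iff_iff]
  simp only [List.all_map, List.all_eq_true, List.mem_range, Function.comp, decide_eq_true_iff]
  rw [hN] at hlenEq
  rw [chunks_iff Lnat (N' + 1) cs hlenEq]
  constructor
  · intro hall k hk
    cases k with
    | zero => simp
    | succ k' => exact (hall k' (by omega)).symm
  · intro hall k hk
    exact (hall (k + 1) (by omega)).symm

theorem check_n_repeats_py_spec_aux : ∀ (id : String) (n_repeats : Int), Pre_check_n_repeats_py id n_repeats → ¬ D_check_n_repeats_py id n_repeats → check_n_repeats_py id n_repeats = check_n_repeats_py_alt id n_repeats := by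
  intro id n hpre hD
  by_cases hmod : PySem.Int.mod (PySem.Str.len id) n = 0
  · rcases lt_trichotomy n 0 with hneg | hz | hpos
    · -- negative n: outside D_ forces id = ""
      have hdvd : n ∣ (id.toList.length : Int) := by
        have h1 := (PySem.Int.mod_eq_zero_iff_dvd (PySem.Str.len id) n).mp hmod
        simpa [PySem.Str.len_eq] using h1
      have hid : id = "" := by
        by_contra hne
        exact hD ⟨hneg, hne, hdvd⟩
      subst hid
      rw [a_neg_true "" n hneg hmod]
      simp only [check_n_repeats_py_alt, hmod]
      simp [PySem.List.slice]
    · exact absurd hz hpre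
    · have hdvd : n ∣ (id.toList.length : Int) := by
        have h1 := (PySem.Int.mod_eq_zero_iff_dvd (PySem.Str.len id) n).mp hmod
        simpa [PySem.Str.len_eq] using h1
      obtain ⟨q, hq⟩ := hdvd
      have hq0 : 0 ≤ q := by nlinarith [Int.natCast_nonneg id.toList.length]
      have hqcast : ((q.toNat : Nat) : Int) = q := Int.toNat_of_nonneg hq0
      have hfd : PySem.Int.floordiv (PySem.Str.len id) n = ((q.toNat : Nat) : Int) := by
        rw [PySem.Str.len_eq, hq, hqcast, Int.mul_comm]
        exact (PySem.Int.floordiv_eq_iff_of_pos hpos).mpr (by constructor <;> nlinarith)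
      have hlenEq : id.toList.length = q.toNat * n.toNat := by
        have h2 : (id.toList.length : Int) = ((q.toNat : Nat) : Int) * ((n.toNat : Nat) : Int) := by
          rw [hqcast, Int.toNat_of_nonneg (le_of_lt hpos)]; linarith [hq]
        exact_mod_cast h2
      exact pos_case id n hpos hmod q.toNat hfd hlenEq
  · -- guard fails: both return False
    simp only [check_n_repeats_py, check_n_repeats_py_alt]
    rw [if_pos (by simpa using hmod), if_pos (by simpa using hmod)]

-- ===== VERDICT (by name: the statement is the Claim_ definition above) =====
theorem check_n_repeats_py_spec : Claim_unchanged_check_n_repeats_py := by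
  intro id n _ hpre hD
  exact check_n_repeats_py_spec_aux id n hpre hD

theorem check_n_repeats_py_changed : Claim_changed_check_n_repeats_py := by
  unfold Claim_changed_check_n_repeats_py; decide

theorem check_n_repeats_py_tight : Claim_exact_check_n_repeats_py := by
  intro id n _ hpre hD
  obtain ⟨hneg, hne, hdvd⟩ := hD
  have hmod : PySem.Int.mod (PySem.Str.len id) n = 0 := by
    apply (PySem.Int.mod_eq_zero_iff_dvd (PySem.Str.len id) n).mpr
    simpa [PySem.Str.len_eq] using hdvd
  rw [a_neg_true id n hneg hmod]
  simp only [check_n_repeats_py_alt, hmod]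
  have hz : n.toNat = 0 := by omega
  simp [hz]
  intro h
  exact hne (by cases id; simp_all)
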